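-- pv_equiv track=rewrite | github.com/nguyhonglong/paper | modules/nlp_module.py | generate_trends
-- ===== SOURCE A (Python) =====
-- def generate_trends(bars):
--     """
--     Phân tích các xu hướng chính từ các tọa độ của cột.
--
--     :param bars: Danh sách các tọa độ của các cột.
--     :return: Văn bản mô tả các xu hướng chính.
--     """
--     trends = []
--     heights = [abs(bar[0][1] - bar[1][1]) for bar in bars]
--     positions = [bar[0][0] for bar in bars]
--
--     # Phát hiện xu hướng chính
--     max_height = max(heights)
--     min_height = min(heights)
--
--     if max_height == min_height:
--         trends.append("All bars are of the same height.")
--     else: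
--         max_index = heights.index(max_height)
--         min_index = heights.index(min_height)
--         trends.append(f"The tallest bar is at position {positions[max_index]} with a height of {max_height}.")
--         trends.append(f"The shortest bar is at position {positions[min_index]} with a height of {min_height}.")
--
--     return " ".join(trends)
-- ===== SOURCE B (Python) =====
-- def generate_trends(bars):
--     max_h = min_h = None
--     max_p = min_p = None
--     for bar in bars:
--         h = abs(bar[0][1] - bar[1][1])
--         p = bar[0][0]
--         if max_h is None or h > max_h:
--             max_h, max_p = h, p
--         if min_h is None or h < min_h:
--             min_h, min_p = h, p
--     if max_h == min_h:
--         return "All bars are of the same height."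
--     return (f"The tallest bar is at position {max_p} with a height of {max_h}. "
--             f"The shortest bar is at position {min_p} with a height of {min_h}.")
-- ===== Notes on version B (the rewrite author's own statement) =====
-- stated objective: alternative
-- what changed: Replaced A's six passes (two list comprehensions, max, min, two .index scans plus indexing) by one loop over the bars that tracks the first maximal and first minimal height together with their positions, building the result string directly.
import Mathlib
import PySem

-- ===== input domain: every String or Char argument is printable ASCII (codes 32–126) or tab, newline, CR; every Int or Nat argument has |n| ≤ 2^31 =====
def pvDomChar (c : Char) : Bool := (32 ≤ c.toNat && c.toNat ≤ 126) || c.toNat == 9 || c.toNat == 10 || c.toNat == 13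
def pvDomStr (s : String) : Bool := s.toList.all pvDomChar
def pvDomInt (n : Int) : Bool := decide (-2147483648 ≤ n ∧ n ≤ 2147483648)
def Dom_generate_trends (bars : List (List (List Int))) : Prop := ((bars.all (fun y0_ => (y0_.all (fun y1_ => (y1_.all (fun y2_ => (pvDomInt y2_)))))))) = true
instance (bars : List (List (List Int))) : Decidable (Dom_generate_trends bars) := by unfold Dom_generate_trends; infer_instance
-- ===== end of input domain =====

-- B replaces A's six passes (two comprehensions, max, min, two .index scans) by one loop tracking
-- the first maximal and first minimal height with their positions (alternative single-pass decomposition).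

-- ===== PORT A =====
-- bar[i][j]; Pre_ keeps every index in range, so the getD defaults are never reached on admitted inputs
def pvCell (bar : List (List Int)) (i j : Int) : Int :=
  (PySem.List.pyGet? ((PySem.List.pyGet? bar i).getD []) j).getD 0

def generate_trends (bars : List (List (List Int))) : String :=
  let heights := bars.map (fun bar => |pvCell bar 0 1 - pvCell bar 1 1|)
  let positions := bars.map (fun bar => pvCell bar 0 0)
  -- max()/min() raise ValueError on an empty list; Pre_ excludes bars = []
  let max_height := (PySem.List.max? heights (fun x => x)).getD 0
  let min_height := (PySem.List.min? heights (fun x => x)).getD 0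
  if max_height = min_height then
    PySem.Str.join " " ["All bars are of the same height."]
  else
    let max_index := (PySem.List.index? heights max_height).getD 0
    let min_index := (PySem.List.index? heights min_height).getD 0
    PySem.Str.join " "
      ["The tallest bar is at position " ++ PySem.Int.toStr ((PySem.List.pyGet? positions (max_index : Int)).getD 0) ++ " with a height of " ++ PySem.Int.toStr max_height ++ ".",
       "The shortest bar is at position " ++ PySem.Int.toStr ((PySem.List.pyGet? positions (min_index : Int)).getD 0) ++ " with a height of " ++ PySem.Int.toStr min_height ++ "."]

-- ===== PORT B =====
-- one step of B's loop: update (max_h, max_p) and (min_h, min_p) with the current bar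
def pvAltStep (st : Option (Int × Int) × Option (Int × Int)) (bar : List (List Int)) :
    Option (Int × Int) × Option (Int × Int) :=
  let h := |(PySem.List.pyGet? ((PySem.List.pyGet? bar 0).getD []) 1).getD 0 -
            (PySem.List.pyGet? ((PySem.List.pyGet? bar 1).getD []) 1).getD 0|
  let p := (PySem.List.pyGet? ((PySem.List.pyGet? bar 0).getD []) 0).getD 0
  (match st.1 with
   | none => some (h, p)
   | some (M, P) => if h > M then some (h, p) else some (M, P),
   match st.2 with
   | none => some (h, p)
   | some (m, q) => if h < m then some (h, p) else some (m, q))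

def generate_trends_alt (bars : List (List (List Int))) : String :=
  let st := bars.foldl pvAltStep (none, none)
  match st.1, st.2 with
  | some (M, P), some (m, q) =>
    if M = m then "All bars are of the same height."
    else "The tallest bar is at position " ++ PySem.Int.toStr P ++ " with a height of " ++ PySem.Int.toStr M ++ ". " ++
         "The shortest bar is at position " ++ PySem.Int.toStr q ++ " with a height of " ++ PySem.Int.toStr m ++ "."
  | _, _ => "All bars are of the same height."

-- ===== PRECONDITION & SPEC =====
-- Pre_ excludes exactly the inputs on which A raises: empty bars (ValueError from max()) and bars whose
-- first/second point lists are too short for bar[0][1]/bar[1][1] (IndexError).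
def Pre_generate_trends (bars : List (List (List Int))) : Prop :=
  bars ≠ [] ∧ ∀ bar ∈ bars, 2 ≤ bar.length ∧ 2 ≤ (bar.getD 0 []).length ∧ 2 ≤ (bar.getD 1 []).length
instance (bars : List (List (List Int))) : Decidable (Pre_generate_trends bars) := by
  unfold Pre_generate_trends; infer_instance
def pvWitness_generate_trends : List (List (List Int)) := [[[0, 0], [0, 1]], [[4, 0], [4, 3]]]

def Spec_generate_trends (bars : List (List (List Int))) (out : String) : Prop := out = generate_trends_alt bars
instance (bars : List (List (List Int))) (out : String) : Decidable (Spec_generate_trends bars out) := by unfold Spec_generate_trends; infer_instance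

-- ===== CLAIM (what is proved, stated in full; the proofs are below) =====
def Claim_equal_generate_trends : Prop := ∀ (bars : List (List (List Int))), Dom_generate_trends bars → Pre_generate_trends bars → Spec_generate_trends bars (generate_trends bars)

-- ===== LEMMAS AND PROOFS =====

-- height and position of one bar, as A computes them
def pvH (bar : List (List Int)) : Int := |pvCell bar 0 1 - pvCell bar 1 1|
def pvP (bar : List (List Int)) : Int := pvCell bar 0 0

def sMax (s x : Int × Int) : Int × Int := if x.1 > s.1 then x else s
def sMin (s x : Int × Int) : Int × Int := if x.1 < s.1 then x else s

lemma altStep_eq (st : Option (Int × Int) × Option (Int × Int)) (bar : List (List Int)) :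
    pvAltStep st bar =
      ((match st.1 with
        | none => some (pvH bar, pvP bar)
        | some s => some (sMax s (pvH bar, pvP bar))),
       (match st.2 with
        | none => some (pvH bar, pvP bar)
        | some s => some (sMin s (pvH bar, pvP bar)))) := by
  obtain ⟨a, b⟩ := st
  rcases a with _ | ⟨M, P⟩ <;> rcases b with _ | ⟨m, q⟩ <;>
    simp only [pvAltStep, pvH, pvP, pvCell, sMax, sMin] <;>
    (first | rfl | (split_ifs <;> rfl))

lemma fold_some (t : List (List (List Int))) :
    ∀ (a b : Int × Int),
      t.foldl pvAltStep (some a, some b) =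
        (some ((t.map (fun c => (pvH c, pvP c))).foldl sMax a),
         some ((t.map (fun c => (pvH c, pvP c))).foldl sMin b)) := by
  induction t with
  | nil => intro a b; simp
  | cons c t ih =>
    intro a b
    simp only [List.foldl_cons, List.map_cons, altStep_eq]
    exact ih _ _

lemma sMax_fst (l : List (Int × Int)) : ∀ s : Int × Int,
    (l.foldl sMax s).1 = (l.map Prod.fst).foldl max s.1 := by
  induction l with
  | nil => intro s; rfl
  | cons x t ih =>
    intro s
    simp only [List.foldl_cons, List.map_cons, ih]
    congr 1
    simp only [sMax]; split_ifs with h <;> omega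

lemma sMin_fst (l : List (Int × Int)) : ∀ s : Int × Int,
    (l.foldl sMin s).1 = (l.map Prod.fst).foldl min s.1 := by
  induction l with
  | nil => intro s; rfl
  | cons x t ih =>
    intro s
    simp only [List.foldl_cons, List.map_cons, ih]
    congr 1
    simp only [sMin]; split_ifs with h <;> omega

lemma le_sMax (l : List (Int × Int)) : ∀ s : Int × Int, s.1 ≤ (l.foldl sMax s).1 := by
  induction l with
  | nil => intro s; simp
  | cons x t ih =>
    intro s
    refine le_trans ?_ (ih (sMax s x))
    simp only [sMax]; split_ifs with h <;> omega

lemma sMin_le (l : List (Int × Int)) : ∀ s : Int × Int, (l.foldl sMin s).1 ≤ s.1 := by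
  induction l with
  | nil => intro s; simp
  | cons x t ih =>
    intro s
    refine le_trans (ih (sMin s x)) ?_
    simp only [sMin]; split_ifs with h <;> omega

lemma sMax_find (l : List (Int × Int)) : ∀ s : Int × Int,
    ((s :: l).find? (fun q => q.1 == (l.foldl sMax s).1)) = some (l.foldl sMax s) := by
  induction l with
  | nil => intro s; simp
  | cons x t ih =>
    intro s
    simp only [List.foldl_cons]
    by_cases hx : x.1 > s.1
    · have hs : sMax s x = x := by simp [sMax, hx]
      rw [hs]
      have h1 : s.1 < (t.foldl sMax x).1 := lt_of_lt_of_le hx (le_sMax t x)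
      rw [List.find?_cons_of_neg (by simp; omega)]
      exact ih x
    · have hs : sMax s x = s := by simp [sMax, hx]
      rw [hs]
      have iht := ih s
      rw [List.find?_cons] at iht
      by_cases he : s.1 = (t.foldl sMax s).1
      · rw [List.find?_cons_of_pos (by simp [he])]
        have hb : (s.1 == (t.foldl sMax s).1) = true := by simp [he]
        simp only [hb] at iht
        exact iht
      · have hlt : s.1 < (t.foldl sMax s).1 := lt_of_le_of_ne (le_sMax t s) he
        rw [List.find?_cons_of_neg (by simp; omega), List.find?_cons_of_neg (by simp; omega)]
        have hb : (s.1 == (t.foldl sMax s).1) = false := by simp [he]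
        simp only [hb] at iht
        exact iht

lemma sMin_find (l : List (Int × Int)) : ∀ s : Int × Int,
    ((s :: l).find? (fun q => q.1 == (l.foldl sMin s).1)) = some (l.foldl sMin s) := by
  induction l with
  | nil => intro s; simp
  | cons x t ih =>
    intro s
    simp only [List.foldl_cons]
    by_cases hx : x.1 < s.1
    · have hs : sMin s x = x := by simp [sMin, hx]
      rw [hs]
      have h1 : (t.foldl sMin x).1 < s.1 := lt_of_le_of_lt (sMin_le t x) hx
      rw [List.find?_cons_of_neg (by simp; omega)]
      exact ih x
    · have hs : sMin s x = s := by simp [sMin, hx]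
      rw [hs]
      have iht := ih s
      rw [List.find?_cons] at iht
      by_cases he : s.1 = (t.foldl sMin s).1
      · rw [List.find?_cons_of_pos (by simp [he])]
        have hb : (s.1 == (t.foldl sMin s).1) = true := by simp [he]
        simp only [hb] at iht
        exact iht
      · have hlt : (t.foldl sMin s).1 < s.1 := lt_of_le_of_ne (sMin_le t s) (Ne.symm he)
        rw [List.find?_cons_of_neg (by simp; omega), List.find?_cons_of_neg (by simp; omega)]
        have hb : (s.1 == (t.foldl sMin s).1) = false := by simp [he]
        simp only [hb] at iht
        exact iht

lemma find_to_index (l : List (Int × Int)) (M : Int) :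
    ∀ r : Int × Int, l.find? (fun q => q.1 == M) = some r →
      r.1 = M ∧ ∃ k : Nat, PySem.List.index? (l.map Prod.fst) M = some k ∧
        (l.map Prod.snd)[k]? = some r.2 := by
  induction l with
  | nil => intro r h; simp at h
  | cons q t ih =>
    intro r h
    by_cases hq : q.1 = M
    · rw [List.find?_cons_of_pos (by simp [hq])] at h
      cases h
      refine ⟨hq, 0, ?_, by simp⟩
      rw [List.map_cons, hq]
      exact PySem.List.index?_cons_self M _
    · rw [List.find?_cons_of_neg (by simp [hq])] at h
      obtain ⟨h1, k, h2, h3⟩ := ih r h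
      refine ⟨h1, k + 1, ?_, by simpa using h3⟩
      rw [List.map_cons, PySem.List.index?_cons_of_ne _ hq, h2]; rfl

lemma join2 (x y : String) : PySem.Str.join " " [x, y] = x ++ " " ++ y := by
  have h := PySem.Str.toList_join " " [x, y]
  simp only [List.map_cons, List.map_nil, PySem.Chars.join_cons_cons,
    PySem.Chars.join_singleton] at h
  apply String.toList_injective
  simpa using h

-- ===== VERDICT (by name: the statement is the Claim_ definition above) =====
theorem generate_trends_spec : Claim_equal_generate_trends := by
  intro bars _dom pre
  unfold Spec_generate_trends
  obtain ⟨hne, -⟩ := pre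
  obtain ⟨c, t, rfl⟩ : ∃ c t, bars = c :: t := by
    cases bars with
    | nil => exact absurd rfl hne
    | cons c t => exact ⟨c, t, rfl⟩
  have hx : pvAltStep (none, none) c = (some (pvH c, pvP c), some (pvH c, pvP c)) := by
    rw [altStep_eq]
  have hmap1 : (c :: t).map (fun bar => |pvCell bar 0 1 - pvCell bar 1 1|)
      = (((pvH c, pvP c) : Int × Int) :: t.map (fun d => (pvH d, pvP d))).map Prod.fst := by
    simp [pvH, List.map_map]
  have hmap2 : (c :: t).map (fun bar => pvCell bar 0 0)
      = (((pvH c, pvP c) : Int × Int) :: t.map (fun d => (pvH d, pvP d))).map Prod.snd := by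
    simp [pvP, List.map_map]
  simp only [generate_trends, generate_trends_alt, List.foldl_cons, hx, fold_some, hmap1, hmap2]
  rw [List.map_cons, List.map_cons, PySem.List.max?_id_cons, PySem.List.min?_id_cons,
    ← sMax_fst, ← sMin_fst]
  simp only [Option.getD_some]
  by_cases hMm : (List.foldl sMax (pvH c, pvP c) (t.map fun d => (pvH d, pvP d))).1
      = (List.foldl sMin (pvH c, pvP c) (t.map fun d => (pvH d, pvP d))).1
  · simp only [hMm, if_true]
    rfl
  · simp only [if_neg hMm]
    obtain ⟨-, k, hk1, hk2⟩ := find_to_index ((pvH c, pvP c) :: t.map (fun d => (pvH d, pvP d)))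
      (List.foldl sMax (pvH c, pvP c) (t.map fun d => (pvH d, pvP d))).1 _ (sMax_find _ _)
    obtain ⟨-, j, hj1, hj2⟩ := find_to_index ((pvH c, pvP c) :: t.map (fun d => (pvH d, pvP d)))
      (List.foldl sMin (pvH c, pvP c) (t.map fun d => (pvH d, pvP d))).1 _ (sMin_find _ _)
    simp only [List.map_cons] at hk1 hk2 hj1 hj2
    rw [hk1, hj1]
    simp only [Option.getD_some, PySem.List.pyGet?_natCast, hk2, hj2]
    rw [join2]
    apply String.toList_injective
    simp
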